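-- pv_equiv track=rewrite | github.com/HRI-EU/multi_modal_gait_database | src/data_frame_extractor.py | get_sequence_ids
-- ===== SOURCE A (Python) =====
-- def get_sequence_ids(labels, id_offset):
--     last_class = -1
--     last_change_idx = 0
--     ids = []
--     id = id_offset + 1
--
--     for idx in range(len(labels)):
--         if idx == 0:
--             last_class = labels[idx]
--         elif last_class != labels[idx]:
--             ids += [id] * (idx - last_change_idx)
--             id += 1
--             last_change_idx = idx
--             last_class = labels[idx]
--     ids += [id] * (len(labels) - last_change_idx)
--     return ids
-- ===== SOURCE B (Python) =====
-- def get_sequence_ids(labels, id_offset):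
--     # two-pointer run grouping: find each run's end, emit the id for the whole run
--     ids = []
--     id = id_offset + 1
--     i = 0
--     n = len(labels)
--     while i < n:
--         j = i + 1
--         while j < n and labels[j] == labels[i]:
--             j += 1
--         ids += [id] * (j - i)
--         id += 1
--         i = j
--     return ids
-- ===== Notes on version B (the rewrite author's own statement) =====
-- stated objective: alternative
-- what changed: B groups runs with a two-pointer scan (inner loop finds the end of each run, then emits the whole block at once), replacing A's change-detection state machine with last_class/last_change_idx bookkeeping.
import Mathlib
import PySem

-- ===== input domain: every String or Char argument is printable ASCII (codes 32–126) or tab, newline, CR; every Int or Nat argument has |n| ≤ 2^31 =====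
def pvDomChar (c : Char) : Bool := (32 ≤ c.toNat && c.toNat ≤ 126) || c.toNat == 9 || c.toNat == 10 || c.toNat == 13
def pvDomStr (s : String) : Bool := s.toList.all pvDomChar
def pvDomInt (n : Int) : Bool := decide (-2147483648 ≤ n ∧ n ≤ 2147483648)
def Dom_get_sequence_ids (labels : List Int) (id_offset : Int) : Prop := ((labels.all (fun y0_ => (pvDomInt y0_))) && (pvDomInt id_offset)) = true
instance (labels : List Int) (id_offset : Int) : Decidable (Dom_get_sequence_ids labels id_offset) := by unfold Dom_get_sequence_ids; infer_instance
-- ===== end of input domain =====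

-- B replaces A's change-detection state machine by a two-pointer run-grouping scan (alternative structure, same cost).

-- ===== PORT A =====
-- state = (last_class, last_change_idx, ids, id); the loop over range(len(labels)) reading
-- labels[idx] is ported as a fold over labels.zipIdx (each step sees idx and labels[idx]).
def stepA_get_sequence_ids (st : Int × Nat × List Int × Int) (p : Int × Nat) :
    Int × Nat × List Int × Int :=
  match st, p with
  | (lastClass, lci, ids, id), (x, idx) =>
    if idx = 0 then (x, lci, ids, id)
    else if lastClass ≠ x then (x, idx, ids ++ List.replicate (idx - lci) id, id + 1)
    else (lastClass, lci, ids, id)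

def get_sequence_ids (labels : List Int) (id_offset : Int) : List Int :=
  let fin := (labels.zipIdx).foldl stepA_get_sequence_ids (-1, 0, [], id_offset + 1)
  fin.2.2.1 ++ List.replicate (labels.length - fin.2.1) fin.2.2.2

-- ===== PORT B =====
-- Source B's outer while-loop (one iteration per run) as structural recursion; the inner
-- scan that advances j to the end of the current run is takeWhile/dropWhile on the tail.
def altGo_get_sequence_ids : List Int → Int → List Int
  | [], _ => []
  | x :: xs, id =>
    List.replicate ((xs.takeWhile (fun y => y == x)).length + 1) id
      ++ altGo_get_sequence_ids (xs.dropWhile (fun y => y == x)) (id + 1)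
termination_by l _ => l.length
decreasing_by
  exact Nat.lt_succ_of_le (List.length_dropWhile_le _ _)

def get_sequence_ids_alt (labels : List Int) (id_offset : Int) : List Int :=
  altGo_get_sequence_ids labels (id_offset + 1)

-- ===== PRECONDITION & SPEC =====
def Spec_get_sequence_ids (labels : List Int) (id_offset : Int) (out : List Int) : Prop := out = get_sequence_ids_alt labels id_offset
instance (labels : List Int) (id_offset : Int) (out : List Int) : Decidable (Spec_get_sequence_ids labels id_offset out) := by unfold Spec_get_sequence_ids; infer_instance

-- ===== CLAIM (what is proved, stated in full; the proofs are below) =====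
def Claim_equal_get_sequence_ids : Prop := ∀ (labels : List Int) (id_offset : Int), Dom_get_sequence_ids labels id_offset → Spec_get_sequence_ids labels id_offset (get_sequence_ids labels id_offset)

-- ===== LEMMAS AND PROOFS =====

lemma takeWhile_rep_self (c : Int) (q : Nat) :
    (List.replicate q c).takeWhile (fun y => y == c) = List.replicate q c := by
  induction q with
  | zero => rfl
  | succ n ih => simp [List.replicate_succ, ih]

lemma dropWhile_rep_self (c : Int) (q : Nat) :
    (List.replicate q c).dropWhile (fun y => y == c) = [] := by
  induction q with
  | zero => rfl
  | succ n ih => simp [List.replicate_succ, ih]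

lemma takeWhile_rep_app (c x : Int) (q : Nat) (xs : List Int) (h : x ≠ c) :
    (List.replicate q c ++ x :: xs).takeWhile (fun y => y == c) = List.replicate q c := by
  induction q with
  | zero => simp [h]
  | succ n ih => simp [List.replicate_succ, List.takeWhile_cons] at ih ⊢; exact ih

lemma dropWhile_rep_app (c x : Int) (q : Nat) (xs : List Int) (h : x ≠ c) :
    (List.replicate q c ++ x :: xs).dropWhile (fun y => y == c) = x :: xs := by
  induction q with
  | zero => simp [h]
  | succ n ih => simp [List.replicate_succ, List.dropWhile_cons] at ih ⊢; exact ih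

-- B on a list that is a c-run of length p: one block of p copies of id.
lemma altGo_rep (c : Int) (p : Nat) (id : Int) (hp : 1 ≤ p) :
    altGo_get_sequence_ids (List.replicate p c) id = List.replicate p id := by
  obtain ⟨q, rfl⟩ := Nat.exists_eq_add_of_le hp
  rw [show (1 + q) = q + 1 from Nat.add_comm 1 q]
  rw [List.replicate_succ]
  rw [altGo_get_sequence_ids]
  rw [takeWhile_rep_self, dropWhile_rep_self]
  simp [altGo_get_sequence_ids, List.length_replicate]

-- B on a c-run of length p followed by a different element: first block, then recurse.
lemma altGo_rep_app (c x : Int) (p : Nat) (xs : List Int) (id : Int) (hp : 1 ≤ p) (h : x ≠ c) :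
    altGo_get_sequence_ids (List.replicate p c ++ x :: xs) id
      = List.replicate p id ++ altGo_get_sequence_ids (x :: xs) (id + 1) := by
  obtain ⟨q, rfl⟩ := Nat.exists_eq_add_of_le hp
  rw [show (1 + q) = q + 1 from Nat.add_comm 1 q]
  rw [List.replicate_succ, List.cons_append]
  rw [altGo_get_sequence_ids]
  rw [takeWhile_rep_app c x q xs h, dropWhile_rep_app c x q xs h]
  simp [List.length_replicate]

-- Loop invariant: after the first iteration, A's fold over the remaining indexed suffix,
-- started from state (c, lci, ids, id) at index k (with lci < k, so the pending run is
-- replicate (k - lci) c), finishes to ids ++ B's run-grouping of (pending run ++ suffix).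
lemma loopA_eq (suf : List Int) (c : Int) (k lci : Nat) (ids : List Int) (id : Int)
    (hk : lci < k) :
    (let fin := (suf.zipIdx k).foldl stepA_get_sequence_ids (c, lci, ids, id)
     fin.2.2.1 ++ List.replicate (k + suf.length - fin.2.1) fin.2.2.2)
      = ids ++ altGo_get_sequence_ids (List.replicate (k - lci) c ++ suf) id := by
  induction suf generalizing c k lci ids id with
  | nil =>
    simp only [List.zipIdx, List.foldl_nil, List.length_nil, Nat.add_zero, List.append_nil]
    rw [altGo_rep c (k - lci) id (by omega)]
  | cons y ys ih =>
    simp only [List.zipIdx_cons, List.foldl_cons]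
    by_cases hcy : c = y
    · subst hcy
      have hstep : stepA_get_sequence_ids (c, lci, ids, id) (c, k) = (c, lci, ids, id) := by
        have hk0 : k ≠ 0 := by omega
        simp [stepA_get_sequence_ids, hk0]
      rw [hstep]
      have := ih c (k + 1) lci ids id (by omega)
      simp only [List.length_cons] at *
      rw [show k + 1 + ys.length = k + (ys.length + 1) by omega] at this
      rw [this]
      have : List.replicate (k + 1 - lci) c = List.replicate (k - lci) c ++ [c] := by
        rw [show k + 1 - lci = (k - lci) + 1 by omega, List.replicate_succ']
      rw [this, List.append_assoc]
      rfl
    · have hstep : stepA_get_sequence_ids (c, lci, ids, id) (y, k)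
          = (y, k, ids ++ List.replicate (k - lci) id, id + 1) := by
        simp [stepA_get_sequence_ids, hcy]
        omega
      rw [hstep]
      have := ih y (k + 1) k (ids ++ List.replicate (k - lci) id) (id + 1) (by omega)
      simp only [List.length_cons] at *
      rw [show k + 1 + ys.length = k + (ys.length + 1) by omega] at this
      rw [this]
      rw [show k + 1 - k = 1 by omega]
      rw [altGo_rep_app c y (k - lci) ys id (by omega) (fun h => hcy h.symm)]
      simp [List.append_assoc]

-- ===== VERDICT (by name: the statement is the Claim_ definition above) =====
theorem get_sequence_ids_spec : Claim_equal_get_sequence_ids := by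
  intro labels id_offset _
  show get_sequence_ids labels id_offset = get_sequence_ids_alt labels id_offset
  cases labels with
  | nil => simp [get_sequence_ids, get_sequence_ids_alt, altGo_get_sequence_ids]
  | cons a rest =>
    unfold get_sequence_ids get_sequence_ids_alt
    simp only [List.zipIdx_cons, List.foldl_cons]
    have hstep : stepA_get_sequence_ids (-1, 0, [], id_offset + 1) (a, 0)
        = (a, 0, [], id_offset + 1) := by simp [stepA_get_sequence_ids]
    rw [hstep]
    simp only [Nat.zero_add, List.length_cons]
    have := loopA_eq rest a 1 0 [] (id_offset + 1) (by omega)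
    simp only [Nat.sub_zero, List.replicate_one, List.singleton_append, List.nil_append] at this
    rw [Nat.add_comm 1 rest.length] at this
    exact this
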